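-- pv_equiv track=rewrite | github.com/Othko97/AoC | 2015/python/src/day1.py | find_basement
-- ===== SOURCE A (Python) =====
-- def find_basement(parens, start=0):
--     """
--     Finds point where the pointer is at -1
--
--     Inputs:
--         * parens - string to be followed
--         * start  - position at start
--     Outputs:
--         * pos    - position when pointer at -1
--     """
--     end = start
--     for i in range(len(parens)):
--         if parens[i] == '(':
--             end += 1
--         if parens[i] == ')':
--             end -= 1
--         if end == -1:
--             return i + 1
--     return 0
-- ===== SOURCE B (Python) =====
-- def find_basement(parens, start=0):
--     def solve(s, e):
--         # first 1-based position within s where the counter (seeded with e) hits -1, else 0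
--         n = len(s)
--         if n == 0:
--             return 0
--         if n == 1:
--             e += 1 if s == '(' else -1 if s == ')' else 0
--             return 1 if e == -1 else 0
--         m = n // 2
--         left, right = s[:m], s[m:]
--         r = solve(left, e)
--         if r:
--             return r
--         r = solve(right, e + left.count('(') - left.count(')'))
--         return m + r if r else 0
--     return solve(parens, start)
-- ===== Notes on version B (the rewrite author's own statement) =====
-- stated objective: alternative
-- what changed: Replaces A's single left-to-right scan with a mutable counter by a divide-and-conquer recursion: split the string in half, look for the first -1 in the left half, otherwise recurse on the right half seeded with the left half's paren delta computed by str.count.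
import Mathlib
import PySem

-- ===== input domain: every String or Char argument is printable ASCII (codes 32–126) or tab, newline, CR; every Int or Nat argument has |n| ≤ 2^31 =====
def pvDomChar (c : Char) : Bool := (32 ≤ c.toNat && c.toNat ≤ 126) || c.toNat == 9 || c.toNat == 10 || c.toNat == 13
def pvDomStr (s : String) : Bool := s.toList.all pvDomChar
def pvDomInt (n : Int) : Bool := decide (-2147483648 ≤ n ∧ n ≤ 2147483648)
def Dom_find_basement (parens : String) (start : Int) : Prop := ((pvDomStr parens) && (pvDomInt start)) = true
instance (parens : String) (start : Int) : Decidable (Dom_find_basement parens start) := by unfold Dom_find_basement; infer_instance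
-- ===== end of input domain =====

-- B replaces A's single left-to-right scan by a divide-and-conquer recursion on string halves,
-- seeding the right half with the left half's paren delta obtained from count (alternative decomposition; not faster).

-- ===== PORT A =====
-- A's for-loop over range(len(parens)) with counter `end`, transcribed as structural recursion carrying (end, i).
def findBasementLoop : List Char → Int → Int → Int
  | [], _, _ => 0
  | c :: cs, e, i =>
    let e1 := if c = '(' then e + 1 else e
    let e2 := if c = ')' then e1 - 1 else e1
    if e2 = -1 then i + 1 else findBasementLoop cs e2 (i + 1)

def find_basement (parens : String) (start : Int) : Int :=
  findBasementLoop parens.toList start 0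

-- ===== PORT B =====
def fbStep (c : Char) : Int := if c = '(' then 1 else if c = ')' then -1 else 0

-- Source B's inner `solve`: split at n // 2, try the left half, else recurse on the right half
-- seeded with e + left.count('(') - left.count(')').  The fuel argument (seeded with the
-- length) only makes the halving recursion structural; it is never exhausted.
def fbSolveF : Nat → List Char → Int → Int
  | 0, _, _ => 0
  | _ + 1, [], _ => 0
  | _ + 1, [c], e => if e + fbStep c = -1 then 1 else 0
  | n + 1, c₁ :: c₂ :: cs, e =>
    let s := c₁ :: c₂ :: cs
    let m := s.length / 2
    let left := s.take m
    let right := s.drop m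
    let r := fbSolveF n left e
    if r ≠ 0 then r
    else
      let r2 := fbSolveF n right (e + ((left.count '(' : Int) - (left.count ')' : Int)))
      if r2 ≠ 0 then (m : Int) + r2 else 0

def find_basement_alt (parens : String) (start : Int) : Int :=
  fbSolveF parens.toList.length parens.toList start

-- ===== PRECONDITION & SPEC =====
def Spec_find_basement (parens : String) (start : Int) (out : Int) : Prop := out = find_basement_alt parens start
instance (parens : String) (start : Int) (out : Int) : Decidable (Spec_find_basement parens start out) := by unfold Spec_find_basement; infer_instance

-- ===== CLAIM (what is proved, stated in full; the proofs are below) =====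
def Claim_equal_find_basement : Prop := ∀ (parens : String) (start : Int), Dom_find_basement parens start → Spec_find_basement parens start (find_basement parens start)

-- ===== LEMMAS AND PROOFS =====

-- index (0-based) of the first character after which the running counter equals -1
def fbHit : List Char → Int → Option Nat
  | [], _ => none
  | c :: cs, e =>
    let e' := e + fbStep c
    if e' = -1 then some 0 else (fbHit cs e').map (· + 1)

theorem fbLoop_eq_hit (cs : List Char) : ∀ (e i : Int),
    findBasementLoop cs e i =
      match fbHit cs e with
      | some j => i + j + 1
      | none => 0 := by
  induction cs with
  | nil => intro e i; simp [findBasementLoop, fbHit]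
  | cons c cs ih =>
    intro e i
    have hstep : (if c = ')' then (if c = '(' then e + 1 else e) - 1
                  else (if c = '(' then e + 1 else e)) = e + fbStep c := by
      by_cases h1 : c = '('
      · have h2 : c ≠ ')' := by simp [h1]
        simp [h1, h2, fbStep]
      · by_cases h2 : c = ')'
        · simp [h1, h2, fbStep]; ring
        · simp [h1, h2, fbStep]
    show (if (if c = ')' then (if c = '(' then e + 1 else e) - 1
              else (if c = '(' then e + 1 else e)) = -1
          then i + 1
          else findBasementLoop cs
            (if c = ')' then (if c = '(' then e + 1 else e) - 1
             else (if c = '(' then e + 1 else e)) (i + 1)) = _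
    rw [hstep]
    by_cases hneg : e + fbStep c = -1
    · simp [fbHit, hneg]
    · simp only [fbHit, if_neg hneg, ih]
      cases h : fbHit cs (e + fbStep c) with
      | none => simp [h]
      | some j => simp [h]; push_cast; ring

theorem fbDelta_eq (xs : List Char) : ∀ (e : Int),
    e + ((xs.count '(' : Int) - (xs.count ')' : Int)) = List.foldl (fun a c => a + fbStep c) e xs := by
  induction xs with
  | nil => intro e; simp
  | cons c cs ih =>
    intro e
    simp only [List.count_cons, List.foldl_cons]
    rw [← ih (e + fbStep c)]
    by_cases h1 : c = '('
    · have h2 : c ≠ ')' := by simp [h1]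
      simp [h1, h2, fbStep]; push_cast; ring
    · by_cases h2 : c = ')' <;> simp [h1, h2, fbStep] <;> push_cast <;> ring

theorem fbHit_append (xs : List Char) : ∀ (ys : List Char) (e : Int),
    fbHit (xs ++ ys) e =
      match fbHit xs e with
      | some j => some j
      | none => (fbHit ys (List.foldl (fun a c => a + fbStep c) e xs)).map (· + xs.length) := by
  induction xs with
  | nil => intro ys e; simp [fbHit]
  | cons c cs ih =>
    intro ys e
    by_cases hneg : e + fbStep c = -1
    · simp [fbHit, hneg]
    · simp only [List.cons_append, fbHit, if_neg hneg, ih, List.foldl_cons]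
      cases h : fbHit cs (e + fbStep c) with
      | none =>
        simp only [h]
        cases fbHit ys (List.foldl (fun a c => a + fbStep c) (e + fbStep c) cs) <;>
          simp [Option.map_map, Function.comp] <;> omega
      | some j => simp [h]

theorem fbSolveF_eq_hit : ∀ (n : Nat) (cs : List Char), cs.length ≤ n → ∀ (e : Int),
    fbSolveF n cs e = match fbHit cs e with | some j => (j : Int) + 1 | none => 0 := by
  intro n
  induction n with
  | zero =>
    intro cs hlen e
    have : cs = [] := List.eq_nil_of_length_eq_zero (Nat.le_zero.mp hlen)
    subst this; simp [fbSolveF, fbHit]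
  | succ n ih =>
    intro cs hlen e
    match cs with
    | [] => simp [fbSolveF, fbHit]
    | [c] => by_cases h : e + fbStep c = -1 <;> simp [fbSolveF, fbHit, h]
    | c₁ :: c₂ :: cs =>
      rw [fbSolveF]
      have hlen2 : 2 ≤ (c₁ :: c₂ :: cs).length := by simp
      have hm1 : 1 ≤ (c₁ :: c₂ :: cs).length / 2 := by omega
      have hmlt : (c₁ :: c₂ :: cs).length / 2 < (c₁ :: c₂ :: cs).length := by omega
      have htk : ((c₁ :: c₂ :: cs).take ((c₁ :: c₂ :: cs).length / 2)).length ≤ n := by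
        rw [List.length_take]; simp at hlen ⊢; omega
      have hdr : ((c₁ :: c₂ :: cs).drop ((c₁ :: c₂ :: cs).length / 2)).length ≤ n := by
        rw [List.length_drop]; simp at hlen ⊢; omega
      have hsplit : (c₁ :: c₂ :: cs).take ((c₁ :: c₂ :: cs).length / 2) ++
          (c₁ :: c₂ :: cs).drop ((c₁ :: c₂ :: cs).length / 2) = c₁ :: c₂ :: cs :=
        List.take_append_drop _ _
      conv_rhs => rw [← hsplit]
      rw [fbHit_append]
      rw [ih _ htk]
      cases hL : fbHit ((c₁ :: c₂ :: cs).take ((c₁ :: c₂ :: cs).length / 2)) e with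
      | some j =>
        have hne : ((j : Int) + 1 ≠ 0) := by omega
        simp only [ne_eq, hne, not_false_eq_true, if_true]
      | none =>
        simp only [if_neg (by simp : ¬ ((0 : Int) ≠ 0))]
        rw [ih _ hdr, fbDelta_eq]
        cases hR : fbHit ((c₁ :: c₂ :: cs).drop ((c₁ :: c₂ :: cs).length / 2))
            (List.foldl (fun a c => a + fbStep c) e ((c₁ :: c₂ :: cs).take ((c₁ :: c₂ :: cs).length / 2))) with
        | none => simp
        | some j =>
          have hne : ((j : Int) + 1 ≠ 0) := by omega
          have hmin : min ((cs.length + 1 + 1) / 2) (cs.length + 1 + 1)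
              = (cs.length + 1 + 1) / 2 := by omega
          simp only [Option.map_some, ne_eq, hne, not_false_eq_true, if_true,
            List.length_take, List.length_cons, hmin]
          push_cast
          ring

theorem fbSolve_eq_hit (cs : List Char) (e : Int) :
    fbSolveF cs.length cs e = match fbHit cs e with | some j => (j : Int) + 1 | none => 0 :=
  fbSolveF_eq_hit cs.length cs (Nat.le_refl _) e

-- ===== VERDICT (by name: the statement is the Claim_ definition above) =====
theorem find_basement_spec : Claim_equal_find_basement := by
  intro parens start _
  unfold Spec_find_basement find_basement find_basement_alt
  rw [fbLoop_eq_hit, fbSolve_eq_hit]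
  cases h : fbHit parens.toList start with
  | none => simp
  | some j => simp
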